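-- pv_equiv track=rewrite | github.com/yandex-praktikum/anfisa1sprint | anfisa_for_friends/test.py | sort_ndiff_items
-- ===== SOURCE A (Python) =====
-- from typing import Optional
--
-- def sort_ndiff_items(ndiff_items):
--     # sort items within blocks with changes based
--     # - on `+`/`-` marker, with marker `?` stuck to its preceding line
--     # - on the position of marked line within block
--     order = []
--     block_ix = 0
--     prev_marker: Optional[str] = None
--     marker_order = {
--         '': 0,
--         '-': 1,
--         '+': 2,
--     }
--     marker_ix = 0
--     for line_ix, item in enumerate(ndiff_items):
--         marker = item[:2].strip()
--         if bool(marker) != bool(prev_marker):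
--             block_ix += 1
--         if marker != '?':
--             marker_ix = marker_order[marker]
--         order.append((block_ix, marker_ix, line_ix))
--         prev_marker = marker
--     return [item for _, item in sorted(zip(order, ndiff_items),
--                                        key=lambda x: x[0])]
-- ===== SOURCE B (Python) =====
-- def sort_ndiff_items(ndiff_items):
--     # One pass: distribute items into three order-preserving rank buckets per
--     # block; emit each finished block as bucket0 ++ bucket1 ++ bucket2.
--     rank_of = {'': 0, '-': 1, '+': 2}
--     out = []
--     buckets = [[], [], []]
--     prev_present = False
--     rank = 0
--     for item in ndiff_items:
--         marker = item[:2].strip()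
--         present = bool(marker)
--         if present != prev_present:
--             for b in buckets:
--                 out.extend(b)
--             buckets = [[], [], []]
--         if marker != '?':
--             rank = rank_of[marker]
--         buckets[rank].append(item)
--         prev_present = present
--     for b in buckets:
--         out.extend(b)
--     return out
-- ===== Notes on version B (the rewrite author's own statement) =====
-- stated objective: alternative
-- what changed: B replaces A's comparison sort over (block, marker, position) key tuples by a single linear pass that distributes each item into one of three order-preserving rank buckets per block and emits each finished block as bucket0 ++ bucket1 ++ bucket2.
import Mathlib
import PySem

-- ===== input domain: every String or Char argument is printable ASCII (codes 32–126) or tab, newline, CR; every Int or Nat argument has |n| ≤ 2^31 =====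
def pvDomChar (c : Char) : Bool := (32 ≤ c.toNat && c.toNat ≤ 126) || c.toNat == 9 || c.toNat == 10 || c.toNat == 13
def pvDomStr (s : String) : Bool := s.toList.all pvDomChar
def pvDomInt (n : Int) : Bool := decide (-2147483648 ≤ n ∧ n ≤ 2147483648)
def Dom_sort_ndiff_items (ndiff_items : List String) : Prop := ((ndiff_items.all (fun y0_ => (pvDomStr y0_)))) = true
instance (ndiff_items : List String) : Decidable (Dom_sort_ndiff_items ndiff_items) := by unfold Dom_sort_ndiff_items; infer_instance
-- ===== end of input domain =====

-- B replaces A's comparison sort over (block, marker, position) keys by a single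
-- pass distributing items into three order-preserving rank buckets per block,
-- emitting each finished block as bucket0 ++ bucket1 ++ bucket2 (objective: alternative).

-- item[:2].strip() — the marker of a line (both Pythons compute this expression)
def pvMarker (s : String) : String := PySem.Str.strip (PySem.Str.slice s none (some 2))
-- bool(marker)
def pvPres (s : String) : Bool := s != ""
-- bool(prev_marker) where prev_marker : Optional[str] (None at the start)
def pvPresOpt : Option String → Bool
  | none => false
  | some m => pvPres m
-- the dict {'': 0, '-': 1, '+': 2} (A's marker_order; B's rank_of)
def pvMarkerOrder : PySem.Dict String Int := PySem.Dict.mk [("", 0), ("-", 1), ("+", 2)]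
-- Python's lexicographic comparison of the (block_ix, marker_ix, line_ix) key tuple
def pvLexKey (x : (Int × Int × Int) × String) : Lex (Int × Lex (Int × Int)) :=
  toLex (x.1.1, toLex (x.1.2.1, x.1.2.2))

-- ===== PORT A =====
-- loop body of A: state (order, block_ix, prev_marker, marker_ix), element (line_ix, item)
def pvStepA (st : List (Int × Int × Int) × Int × Option String × Int) (li : Int × String) :
    List (Int × Int × Int) × Int × Option String × Int :=
  let marker := pvMarker li.2
  let block_ix := if pvPres marker ≠ pvPresOpt st.2.2.1 then st.2.1 + 1 else st.2.1
  -- marker_order[marker]: getD is the total form; Pre_ excludes the KeyError (missing-key) case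
  let marker_ix := if marker ≠ "?" then PySem.Dict.getD pvMarkerOrder marker 0 else st.2.2.2
  (st.1 ++ [(block_ix, marker_ix, li.1)], block_ix, some marker, marker_ix)

def sort_ndiff_items (ndiff_items : List String) : List String :=
  -- sorted(zip(order, ndiff_items), key=lambda x: x[0]) with Python's lex tuple order, then take the items
  (PySem.List.sorted
    (((PySem.List.enumerate ndiff_items).foldl pvStepA ([], 0, none, 0)).1.zip ndiff_items)
    pvLexKey).map (·.2)

-- ===== PORT B =====
-- loop body of B: state (out, (bucket0, bucket1, bucket2), prev_present, rank)
def pvStepB (st : List String × (List String × List String × List String) × Bool × Int)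
    (item : String) : List String × (List String × List String × List String) × Bool × Int :=
  let marker := pvMarker item
  let present := pvPres marker
  let s :=
    if present ≠ st.2.2.1 then (st.1 ++ st.2.1.1 ++ st.2.1.2.1 ++ st.2.1.2.2,
      (([] : List String), ([] : List String), ([] : List String)))
    else (st.1, st.2.1)
  -- rank_of[marker]: getD is the total form; Pre_ excludes the KeyError (missing-key) case
  let rank := if marker ≠ "?" then PySem.Dict.getD pvMarkerOrder marker 0 else st.2.2.2
  -- buckets[rank].append(item); rank is always 0, 1 or 2
  let bk :=
    if rank = 0 then (s.2.1 ++ [item], s.2.2.1, s.2.2.2)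
    else if rank = 1 then (s.2.1, s.2.2.1 ++ [item], s.2.2.2)
    else (s.2.1, s.2.2.1, s.2.2.2 ++ [item])
  (s.1, bk, present, rank)

-- the final flush: out extended with the three buckets
def pvFlush (st : List String × (List String × List String × List String) × Bool × Int) :
    List String :=
  st.1 ++ st.2.1.1 ++ st.2.1.2.1 ++ st.2.1.2.2

def sort_ndiff_items_alt (ndiff_items : List String) : List String :=
  pvFlush (ndiff_items.foldl pvStepB ([], ([], [], []), false, 0))

-- ===== PRECONDITION & SPEC =====
-- Pre_ excludes exactly the inputs on which Python A raises KeyError (a line whose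
-- stripped two-char prefix is none of '', '-', '+', '?'); Python B raises there too.
def Pre_sort_ndiff_items (ndiff_items : List String) : Prop :=
  ∀ s ∈ ndiff_items, pvMarker s ∈ (["", "-", "+", "?"] : List String)
instance (ndiff_items : List String) : Decidable (Pre_sort_ndiff_items ndiff_items) := by
  unfold Pre_sort_ndiff_items; infer_instance

def pvWitness_sort_ndiff_items : List String := ["- a", "+ a", "?  ^", "  x", "  y", "- b"]

def Spec_sort_ndiff_items (ndiff_items : List String) (out : List String) : Prop := out = sort_ndiff_items_alt ndiff_items
instance (ndiff_items : List String) (out : List String) : Decidable (Spec_sort_ndiff_items ndiff_items out) := by unfold Spec_sort_ndiff_items; infer_instance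

-- ===== CLAIM (what is proved, stated in full; the proofs are below) =====
def Claim_equal_sort_ndiff_items : Prop := ∀ (ndiff_items : List String), Dom_sort_ndiff_items ndiff_items → Pre_sort_ndiff_items ndiff_items → Spec_sort_ndiff_items ndiff_items (sort_ndiff_items ndiff_items)

-- ===== LEMMAS AND PROOFS =====

-- next block id / next rank, as both loops compute them
def pvBlk (m : String) (p : Bool) (b : Int) : Int := if pvPres m ≠ p then b + 1 else b
def pvRank (m : String) (r : Int) : Int := if m ≠ "?" then PySem.Dict.getD pvMarkerOrder m 0 else r

-- the (block, rank, index) annotation both loops assign to each line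
def pvAnn : List String → Int → Int → Bool → Int → List ((Int × Int × Int) × String)
  | [], _, _, _, _ => []
  | x :: xs, n, b, p, r =>
    ((pvBlk (pvMarker x) p b, pvRank (pvMarker x) r, n), x) ::
      pvAnn xs (n + 1) (pvBlk (pvMarker x) p b) (pvPres (pvMarker x)) (pvRank (pvMarker x) r)

-- B's bucket distribution, run over the annotated list (keys kept alongside the items)
def pvEmit : List ((Int × Int × Int) × String) →
    List ((Int × Int × Int) × String) → List ((Int × Int × Int) × String) →
    List ((Int × Int × Int) × String) → List ((Int × Int × Int) × String) → Int →
    List ((Int × Int × Int) × String)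
  | [], out, c0, c1, c2, _ => out ++ c0 ++ c1 ++ c2
  | k :: ks, out, c0, c1, c2, B =>
    let s := if k.1.1 ≠ B then (out ++ c0 ++ c1 ++ c2,
        ([] : List ((Int × Int × Int) × String)), ([] : List ((Int × Int × Int) × String)),
        ([] : List ((Int × Int × Int) × String)))
      else (out, c0, c1, c2)
    if k.1.2.1 = 0 then pvEmit ks s.1 (s.2.1 ++ [k]) s.2.2.1 s.2.2.2 k.1.1
    else if k.1.2.1 = 1 then pvEmit ks s.1 s.2.1 (s.2.2.1 ++ [k]) s.2.2.2 k.1.1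
    else pvEmit ks s.1 s.2.1 s.2.2.1 (s.2.2.2 ++ [k]) k.1.1

-- one unfolding step of pvEmit with the key components exposed
lemma pvEmit_cons (bk rk ix B : Int) (it : String)
    (ks out c0 c1 c2 : List ((Int × Int × Int) × String)) :
    pvEmit (((bk, rk, ix), it) :: ks) out c0 c1 c2 B =
      if bk = B then
        (if rk = 0 then pvEmit ks out (c0 ++ [((bk, rk, ix), it)]) c1 c2 bk
         else if rk = 1 then pvEmit ks out c0 (c1 ++ [((bk, rk, ix), it)]) c2 bk
         else pvEmit ks out c0 c1 (c2 ++ [((bk, rk, ix), it)]) bk)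
      else
        (if rk = 0 then pvEmit ks (out ++ c0 ++ c1 ++ c2) [((bk, rk, ix), it)] [] [] bk
         else if rk = 1 then pvEmit ks (out ++ c0 ++ c1 ++ c2) [] [((bk, rk, ix), it)] [] bk
         else pvEmit ks (out ++ c0 ++ c1 ++ c2) [] [] [((bk, rk, ix), it)] bk) := by
  rw [pvEmit]
  by_cases hb : bk = B <;>
    rcases eq_or_ne rk 0 with h0 | h0 <;>
    rcases eq_or_ne rk 1 with h1 | h1 <;>
    simp only [hb, h0, h1, ne_eq, not_true_eq_false, not_false_eq_true, if_pos, if_neg,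
      ite_true, ite_false, List.nil_append]

def pvKlt (k k' : (Int × Int × Int) × String) : Prop := pvLexKey k < pvLexKey k'

lemma pvKlt_iff (k k' : (Int × Int × Int) × String) :
    pvKlt k k' ↔ k.1.1 < k'.1.1 ∨ (k.1.1 = k'.1.1 ∧ (k.1.2.1 < k'.1.2.1 ∨ (k.1.2.1 = k'.1.2.1 ∧ k.1.2.2 < k'.1.2.2))) := by
  simp [pvKlt, pvLexKey, Prod.Lex.lt_iff]

lemma pvAnn_map_snd (xs : List String) : ∀ n b p r, (pvAnn xs n b p r).map (·.2) = xs := by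
  induction xs with
  | nil => intro n b p r; rfl
  | cons x xs ih => intro n b p r; simp [pvAnn, ih]

lemma pvRank_mem (m : String) (r : Int) (hr : r = 0 ∨ r = 1 ∨ r = 2) :
    pvRank m r = 0 ∨ pvRank m r = 1 ∨ pvRank m r = 2 := by
  unfold pvRank
  split
  · by_cases h0 : m = ""
    · subst h0; left; rfl
    · by_cases h1 : m = "-"
      · subst h1; right; left; rfl
      · by_cases h2 : m = "+"
        · subst h2; right; right; rfl
        · left
          simp [pvMarkerOrder, PySem.Dict.getD, PySem.Dict.get?, Ne.symm h0, Ne.symm h1, Ne.symm h2]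
  · exact hr

-- A's loop builds exactly the pvAnn keys
lemma foldA_order : ∀ (xs : List String) (n b : Int) (pm : Option String) (r : Int)
    (acc : List (Int × Int × Int)),
    ((PySem.List.enumerate xs n).foldl pvStepA (acc, b, pm, r)).1
      = acc ++ (pvAnn xs n b (pvPresOpt pm) r).map (·.1) := by
  intro xs
  induction xs with
  | nil => intro n b pm r acc; simp [PySem.List.enumerate_nil, pvAnn]
  | cons x xs ih =>
    intro n b pm r acc
    rw [PySem.List.enumerate_cons]
    simp only [List.foldl_cons]
    rw [show pvStepA (acc, b, pm, r) (n, x)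
        = (acc ++ [(pvBlk (pvMarker x) (pvPresOpt pm) b, pvRank (pvMarker x) r, n)],
           pvBlk (pvMarker x) (pvPresOpt pm) b, some (pvMarker x), pvRank (pvMarker x) r) from rfl]
    rw [ih]
    simp [pvAnn, pvPresOpt]

-- B's loop is pvEmit over the annotated list, forgetting the keys
lemma foldB_eq : ∀ (xs : List String) (n b : Int) (p : Bool) (r : Int)
    (out c0 c1 c2 : List ((Int × Int × Int) × String)),
    pvFlush (xs.foldl pvStepB (out.map (·.2), (c0.map (·.2), c1.map (·.2), c2.map (·.2)), p, r))
      = (pvEmit (pvAnn xs n b p r) out c0 c1 c2 b).map (·.2) := by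
  intro xs
  induction xs with
  | nil => intro n b p r out c0 c1 c2; simp [pvAnn, pvEmit, pvFlush]
  | cons x xs ih =>
    intro n b p r out c0 c1 c2
    rw [List.foldl_cons, pvAnn, pvEmit_cons]
    by_cases hp : pvPres (pvMarker x) = p
    · have hblk : pvBlk (pvMarker x) p b = b := by simp [pvBlk, hp]
      rw [if_pos hblk, hblk]
      rw [show pvStepB (out.map (·.2), (c0.map (·.2), c1.map (·.2), c2.map (·.2)), p, r) x
          = (out.map (·.2),
             (if pvRank (pvMarker x) r = 0 then
                (c0.map (·.2) ++ [x], c1.map (·.2), c2.map (·.2))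
              else if pvRank (pvMarker x) r = 1 then
                (c0.map (·.2), c1.map (·.2) ++ [x], c2.map (·.2))
              else (c0.map (·.2), c1.map (·.2), c2.map (·.2) ++ [x])),
             pvPres (pvMarker x), pvRank (pvMarker x) r) from by
        simp [pvStepB, pvRank, hp]]
      rcases eq_or_ne (pvRank (pvMarker x) r) 0 with h0 | h0
      · rw [if_pos h0, if_pos h0]
        have := ih (n+1) b (pvPres (pvMarker x)) (pvRank (pvMarker x) r)
          out (c0 ++ [((b, pvRank (pvMarker x) r, n), x)]) c1 c2
        simp only [List.map_append, List.map_cons, List.map_nil] at this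
        exact this
      · rw [if_neg h0, if_neg h0]
        rcases eq_or_ne (pvRank (pvMarker x) r) 1 with h1 | h1
        · rw [if_pos h1, if_pos h1]
          have := ih (n+1) b (pvPres (pvMarker x)) (pvRank (pvMarker x) r)
            out c0 (c1 ++ [((b, pvRank (pvMarker x) r, n), x)]) c2
          simp only [List.map_append, List.map_cons, List.map_nil] at this
          exact this
        · rw [if_neg h1, if_neg h1]
          have := ih (n+1) b (pvPres (pvMarker x)) (pvRank (pvMarker x) r)
            out c0 c1 (c2 ++ [((b, pvRank (pvMarker x) r, n), x)])
          simp only [List.map_append, List.map_cons, List.map_nil] at this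
          exact this
    · have hblk : pvBlk (pvMarker x) p b = b + 1 := by simp [pvBlk, hp]
      have hne : ¬ (pvBlk (pvMarker x) p b = b) := by rw [hblk]; omega
      rw [if_neg hne, hblk]
      rw [show pvStepB (out.map (·.2), (c0.map (·.2), c1.map (·.2), c2.map (·.2)), p, r) x
          = (out.map (·.2) ++ c0.map (·.2) ++ c1.map (·.2) ++ c2.map (·.2),
             (if pvRank (pvMarker x) r = 0 then ([x], ([] : List String), ([] : List String))
              else if pvRank (pvMarker x) r = 1 then (([] : List String), [x], ([] : List String))
              else (([] : List String), ([] : List String), [x])),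
             pvPres (pvMarker x), pvRank (pvMarker x) r) from by
        simp [pvStepB, pvRank, hp]]
      rcases eq_or_ne (pvRank (pvMarker x) r) 0 with h0 | h0
      · rw [if_pos h0, if_pos h0]
        have := ih (n+1) (b+1) (pvPres (pvMarker x)) (pvRank (pvMarker x) r)
          (out ++ c0 ++ c1 ++ c2) [((b+1, pvRank (pvMarker x) r, n), x)] [] []
        simp only [List.map_append, List.map_cons, List.map_nil] at this
        exact this
      · rw [if_neg h0, if_neg h0]
        rcases eq_or_ne (pvRank (pvMarker x) r) 1 with h1 | h1
        · rw [if_pos h1, if_pos h1]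
          have := ih (n+1) (b+1) (pvPres (pvMarker x)) (pvRank (pvMarker x) r)
            (out ++ c0 ++ c1 ++ c2) [] [((b+1, pvRank (pvMarker x) r, n), x)] []
          simp only [List.map_append, List.map_cons, List.map_nil] at this
          exact this
        · rw [if_neg h1, if_neg h1]
          have := ih (n+1) (b+1) (pvPres (pvMarker x)) (pvRank (pvMarker x) r)
            (out ++ c0 ++ c1 ++ c2) [] [] [((b+1, pvRank (pvMarker x) r, n), x)]
          simp only [List.map_append, List.map_cons, List.map_nil] at this
          exact this

lemma pvEmit_perm : ∀ (ks out c0 c1 c2 : List ((Int × Int × Int) × String)) (B : Int),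
    (pvEmit ks out c0 c1 c2 B).Perm (out ++ c0 ++ c1 ++ c2 ++ ks) := by
  intro ks
  induction ks with
  | nil => intro out c0 c1 c2 B; simp [pvEmit]
  | cons k ks ih =>
    intro out c0 c1 c2 B
    rw [pvEmit]
    rcases eq_or_ne k.1.2.1 0 with h0 | h0
    · simp only [h0, if_pos rfl, if_true]
      by_cases hB : k.1.1 = B <;>
        simp only [ne_eq, hB, not_true_eq_false, not_false_eq_true, if_pos, if_neg,
          ite_true, ite_false] <;>
        refine (ih _ _ _ _ _).trans ?_ <;>
        (rw [List.perm_iff_count]; intro a;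
         by_cases ha : a = k <;> simp [List.count_append, List.count_cons, ha] <;> omega)
    · rcases eq_or_ne k.1.2.1 1 with h1 | h1
      · simp only [h0, h1, if_neg, if_pos rfl, ite_false, ite_true]
        by_cases hB : k.1.1 = B <;>
          simp only [ne_eq, hB, not_true_eq_false, not_false_eq_true, if_pos, if_neg,
            ite_true, ite_false] <;>
          refine (ih _ _ _ _ _).trans ?_ <;>
          (rw [List.perm_iff_count]; intro a;
           by_cases ha : a = k <;> simp [List.count_append, List.count_cons, ha] <;> omega)
      · simp only [h0, h1, if_neg, ite_false]
        by_cases hB : k.1.1 = B <;>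
          simp only [ne_eq, hB, not_true_eq_false, not_false_eq_true, if_pos, if_neg,
            ite_true, ite_false] <;>
          refine (ih _ _ _ _ _).trans ?_ <;>
          (rw [List.perm_iff_count]; intro a;
           by_cases ha : a = k <;> simp [List.count_append, List.count_cons, ha] <;> omega)

-- A's klt is a strict order fact on the concatenation of flushed blocks and buckets
lemma pvPairwise_concat (out c0 c1 c2 : List ((Int × Int × Int) × String)) (b n : Int)
    (hout : out.Pairwise pvKlt) (hc0 : c0.Pairwise pvKlt) (hc1 : c1.Pairwise pvKlt)
    (hc2 : c2.Pairwise pvKlt)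
    (hob : ∀ k ∈ out, k.1.1 < b)
    (h0 : ∀ k ∈ c0, k.1.1 = b ∧ k.1.2.1 = 0 ∧ k.1.2.2 < n)
    (h1 : ∀ k ∈ c1, k.1.1 = b ∧ k.1.2.1 = 1 ∧ k.1.2.2 < n)
    (h2 : ∀ k ∈ c2, k.1.1 = b ∧ k.1.2.1 = 2 ∧ k.1.2.2 < n) :
    (out ++ c0 ++ c1 ++ c2).Pairwise pvKlt := by
  rw [List.pairwise_append, List.pairwise_append, List.pairwise_append]
  refine ⟨⟨⟨hout, hc0, ?_⟩, hc1, ?_⟩, hc2, ?_⟩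
  · intro a ha k hk
    rw [pvKlt_iff]; left; rw [(h0 k hk).1]; exact hob a ha
  · intro a ha k hk
    rw [List.mem_append] at ha
    rw [pvKlt_iff]
    rcases ha with ha | ha
    · left; rw [(h1 k hk).1]; exact hob a ha
    · right
      exact ⟨(h0 a ha).1.trans (h1 k hk).1.symm, Or.inl (by rw [(h0 a ha).2.1, (h1 k hk).2.1]; omega)⟩
  · intro a ha k hk
    rw [List.mem_append, List.mem_append] at ha
    rw [pvKlt_iff]
    rcases ha with (ha | ha) | ha
    · left; rw [(h2 k hk).1]; exact hob a ha
    · right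
      exact ⟨(h0 a ha).1.trans (h2 k hk).1.symm, Or.inl (by rw [(h0 a ha).2.1, (h2 k hk).2.1]; omega)⟩
    · right
      exact ⟨(h1 a ha).1.trans (h2 k hk).1.symm, Or.inl (by rw [(h1 a ha).2.1, (h2 k hk).2.1]; omega)⟩

lemma pvEmit_ann_pairwise : ∀ (xs : List String) (n b : Int) (p : Bool) (r : Int)
    (out c0 c1 c2 : List ((Int × Int × Int) × String)),
    (r = 0 ∨ r = 1 ∨ r = 2) →
    out.Pairwise pvKlt → c0.Pairwise pvKlt → c1.Pairwise pvKlt → c2.Pairwise pvKlt →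
    (∀ k ∈ out, k.1.1 < b) →
    (∀ k ∈ c0, k.1.1 = b ∧ k.1.2.1 = 0 ∧ k.1.2.2 < n) →
    (∀ k ∈ c1, k.1.1 = b ∧ k.1.2.1 = 1 ∧ k.1.2.2 < n) →
    (∀ k ∈ c2, k.1.1 = b ∧ k.1.2.1 = 2 ∧ k.1.2.2 < n) →
    (pvEmit (pvAnn xs n b p r) out c0 c1 c2 b).Pairwise pvKlt := by
  intro xs
  induction xs with
  | nil =>
    intro n b p r out c0 c1 c2 hr hout hc0 hc1 hc2 hob h0 h1 h2
    rw [pvAnn, pvEmit]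
    exact pvPairwise_concat out c0 c1 c2 b n hout hc0 hc1 hc2 hob h0 h1 h2
  | cons x xs ih =>
    intro n b p r out c0 c1 c2 hr hout hc0 hc1 hc2 hob h0 h1 h2
    have hr' := pvRank_mem (pvMarker x) r hr
    rw [pvAnn, pvEmit_cons]
    by_cases hp : pvPres (pvMarker x) = p
    · -- no flush: the new item joins the current block b
      have hblk : pvBlk (pvMarker x) p b = b := by simp [pvBlk, hp]
      rw [if_pos hblk, hblk]
      have h0' : ∀ k ∈ c0, k.1.1 = b ∧ k.1.2.1 = 0 ∧ k.1.2.2 < n + 1 :=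
        fun k hk => ⟨(h0 k hk).1, (h0 k hk).2.1, by have := (h0 k hk).2.2; omega⟩
      have h1' : ∀ k ∈ c1, k.1.1 = b ∧ k.1.2.1 = 1 ∧ k.1.2.2 < n + 1 :=
        fun k hk => ⟨(h1 k hk).1, (h1 k hk).2.1, by have := (h1 k hk).2.2; omega⟩
      have h2' : ∀ k ∈ c2, k.1.1 = b ∧ k.1.2.1 = 2 ∧ k.1.2.2 < n + 1 :=
        fun k hk => ⟨(h2 k hk).1, (h2 k hk).2.1, by have := (h2 k hk).2.2; omega⟩
      rcases eq_or_ne (pvRank (pvMarker x) r) 0 with hq0 | hq0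
      · rw [if_pos hq0, hq0]
        refine ih (n+1) b (pvPres (pvMarker x)) 0 out (c0 ++ [((b, 0, n), x)]) c1 c2
          (Or.inl rfl) hout ?_ hc1 hc2 hob ?_ h1' h2'
        · rw [List.pairwise_append]
          refine ⟨hc0, List.pairwise_singleton _ _, ?_⟩
          intro a ha k hk
          rw [List.mem_singleton] at hk; subst hk
          rw [pvKlt_iff]
          exact Or.inr ⟨(h0 a ha).1, Or.inr ⟨(h0 a ha).2.1, (h0 a ha).2.2⟩⟩
        · intro k hk
          rw [List.mem_append, List.mem_singleton] at hk
          rcases hk with hk | hk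
          · exact h0' k hk
          · subst hk; exact ⟨rfl, rfl, by show n < n + 1; omega⟩
      · rw [if_neg hq0]
        rcases eq_or_ne (pvRank (pvMarker x) r) 1 with hq1 | hq1
        · rw [if_pos hq1, hq1]
          refine ih (n+1) b (pvPres (pvMarker x)) 1 out c0 (c1 ++ [((b, 1, n), x)]) c2
            (Or.inr (Or.inl rfl)) hout hc0 ?_ hc2 hob h0' ?_ h2'
          · rw [List.pairwise_append]
            refine ⟨hc1, List.pairwise_singleton _ _, ?_⟩
            intro a ha k hk
            rw [List.mem_singleton] at hk; subst hk
            rw [pvKlt_iff]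
            exact Or.inr ⟨(h1 a ha).1, Or.inr ⟨(h1 a ha).2.1, (h1 a ha).2.2⟩⟩
          · intro k hk
            rw [List.mem_append, List.mem_singleton] at hk
            rcases hk with hk | hk
            · exact h1' k hk
            · subst hk; exact ⟨rfl, rfl, by show n < n + 1; omega⟩
        · have hq2 : pvRank (pvMarker x) r = 2 := by
            rcases hr' with h | h | h
            · exact absurd h hq0
            · exact absurd h hq1
            · exact h
          rw [if_neg hq1, hq2]
          refine ih (n+1) b (pvPres (pvMarker x)) 2 out c0 c1 (c2 ++ [((b, 2, n), x)])
            (Or.inr (Or.inr rfl)) hout hc0 hc1 ?_ hob h0' h1' ?_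
          · rw [List.pairwise_append]
            refine ⟨hc2, List.pairwise_singleton _ _, ?_⟩
            intro a ha k hk
            rw [List.mem_singleton] at hk; subst hk
            rw [pvKlt_iff]
            exact Or.inr ⟨(h2 a ha).1, Or.inr ⟨(h2 a ha).2.1, (h2 a ha).2.2⟩⟩
          · intro k hk
            rw [List.mem_append, List.mem_singleton] at hk
            rcases hk with hk | hk
            · exact h2' k hk
            · subst hk; exact ⟨rfl, rfl, by show n < n + 1; omega⟩
    · -- flush: the current block is emitted, the new item opens block b + 1
      have hblk : pvBlk (pvMarker x) p b = b + 1 := by simp [pvBlk, hp]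
      have hne : ¬ (pvBlk (pvMarker x) p b = b) := by rw [hblk]; omega
      rw [if_neg hne, hblk]
      have hconcat := pvPairwise_concat out c0 c1 c2 b n hout hc0 hc1 hc2 hob h0 h1 h2
      have hob' : ∀ k ∈ out ++ c0 ++ c1 ++ c2, k.1.1 < b + 1 := by
        intro k hk
        simp only [List.mem_append] at hk
        rcases hk with ((hk | hk) | hk) | hk
        · have := hob k hk; omega
        · have := (h0 k hk).1; omega
        · have := (h1 k hk).1; omega
        · have := (h2 k hk).1; omega
      have hnil0 : ∀ j, ∀ k ∈ ([] : List ((Int × Int × Int) × String)),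
          k.1.1 = b + 1 ∧ k.1.2.1 = j ∧ k.1.2.2 < n + 1 := by intro j k hk; cases hk
      rcases eq_or_ne (pvRank (pvMarker x) r) 0 with hq0 | hq0
      · rw [if_pos hq0, hq0]
        refine ih (n+1) (b+1) (pvPres (pvMarker x)) 0 (out ++ c0 ++ c1 ++ c2)
          [((b+1, 0, n), x)] [] [] (Or.inl rfl) hconcat
          (List.pairwise_singleton _ _) (List.Pairwise.nil) (List.Pairwise.nil)
          hob' ?_ (hnil0 1) (hnil0 2)
        intro k hk
        rw [List.mem_singleton] at hk; subst hk
        exact ⟨rfl, rfl, by show n < n + 1; omega⟩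
      · rw [if_neg hq0]
        rcases eq_or_ne (pvRank (pvMarker x) r) 1 with hq1 | hq1
        · rw [if_pos hq1, hq1]
          refine ih (n+1) (b+1) (pvPres (pvMarker x)) 1 (out ++ c0 ++ c1 ++ c2)
            [] [((b+1, 1, n), x)] [] (Or.inr (Or.inl rfl)) hconcat
            (List.Pairwise.nil) (List.pairwise_singleton _ _) (List.Pairwise.nil)
            hob' (hnil0 0) ?_ (hnil0 2)
          intro k hk
          rw [List.mem_singleton] at hk; subst hk
          exact ⟨rfl, rfl, by show n < n + 1; omega⟩
        · have hq2 : pvRank (pvMarker x) r = 2 := by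
            rcases hr' with h | h | h
            · exact absurd h hq0
            · exact absurd h hq1
            · exact h
          rw [if_neg hq1, hq2]
          refine ih (n+1) (b+1) (pvPres (pvMarker x)) 2
            (out ++ c0 ++ c1 ++ c2) [] [] [((b+1, 2, n), x)]
            (Or.inr (Or.inr rfl)) hconcat (List.Pairwise.nil) (List.Pairwise.nil)
            (List.pairwise_singleton _ _) hob' (hnil0 0) (hnil0 1) ?_
          intro k hk
          rw [List.mem_singleton] at hk; subst hk
          exact ⟨rfl, rfl, by show n < n + 1; omega⟩

-- ===== VERDICT (by name: the statement is the Claim_ definition above) =====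
theorem sort_ndiff_items_spec : Claim_equal_sort_ndiff_items := by
  intro xs _ _
  unfold Spec_sort_ndiff_items sort_ndiff_items sort_ndiff_items_alt
  have horder := foldA_order xs 0 0 none 0 []
  simp only [pvPresOpt] at horder
  rw [horder]
  have hzipgen : ∀ (l : List ((Int × Int × Int) × String)) (ys : List String),
      l.map (·.2) = ys → (l.map (·.1)).zip ys = l := by
    intro l ys h
    subst h
    rw [List.zip_map']
    simp
  have hzip : ((pvAnn xs 0 0 false 0).map (·.1)).zip xs = pvAnn xs 0 0 false 0 :=
    hzipgen _ xs (pvAnn_map_snd xs 0 0 false 0)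
  simp only [List.nil_append, hzip]
  have hsorted : PySem.List.sorted (pvAnn xs 0 0 false 0) pvLexKey
      = pvEmit (pvAnn xs 0 0 false 0) [] [] [] [] 0 := by
    apply PySem.List.sorted_eq_of_perm_of_pairwise_lt
    · simpa using pvEmit_perm (pvAnn xs 0 0 false 0) [] [] [] [] 0
    · have := pvEmit_ann_pairwise xs 0 0 false 0 [] [] [] [] (Or.inl rfl)
        (by simp) (by simp) (by simp) (by simp)
        (by simp) (by simp) (by simp) (by simp)
      exact this.imp (fun h => h)
  rw [hsorted]
  have := foldB_eq xs 0 0 false 0 [] [] [] []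
  simpa using this.symm
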